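-- pv_equiv track=rewrite | github.com/renaudll/maya-mock | python/maya_mock/base/schema.py | iter_namespaces
-- ===== SOURCE A (Python) =====
-- def get_namespace_parent(namespace):
--     """
--     From a provided namespace, return it's parent or None if there's no parent.
--
--     >>> get_namespace_parent('org.foo.bar')
--     'org.foo'
--     >>> get_namespace_parent('org') is None
--     True
--
--     :param str namespace: The namespace to query.
--     :return: The parent namespace
--     :rtype: str
--     """
--     return namespace.rsplit('.', 1)[0] if '.' in namespace else None
--
-- def iter_namespaces(namespaces):
--     """
--     From a list of namespace, yield all namespaces including their parent in hierarchy order.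
--
--     >>> tuple(iter_namespaces(['a.b', 'a.b.c', 'd.e']))
--     ('a', 'a.b', 'a.b.c', 'd', 'd.e')
--
--     :param namespaces: A list of namespaces.
--     :type namespaces: list(str)
--     :return: A namespace generator
--     :rtype: generator(str)
--     """
--     known = set()
--
--     def subroutine(namespace):
--         # Don't yield the same node twice
--         if namespace in known:
--             return
--
--         # Recursively yield parent first
--         parent_namespace = get_namespace_parent(namespace)
--         if parent_namespace:
--             for yielded in subroutine(parent_namespace):
--                 yield yielded
--
--         # Yield
--         known.add(namespace)
--         yield namespace
--
--     for namespace in namespaces: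
--         for yielded in subroutine(namespace):
--             yield yielded
-- ===== SOURCE B (Python) =====
-- def iter_namespaces(namespaces):
--     """Yield each namespace and its ancestors in hierarchy order, deduplicated.
--
--     Iterative: the ancestor chain of a namespace is the list of its prefixes
--     cut just before each '.', plus the namespace itself; a leading empty
--     prefix (namespace starting with '.') is not a real ancestor and is dropped.
--     """
--     known = set()
--     for ns in namespaces:
--         chain = [ns[:i] for i, ch in enumerate(ns) if ch == '.']
--         chain.append(ns)
--         if len(chain) > 1 and chain[0] == '':
--             del chain[0]
--         for prefix in chain:
--             if prefix not in known:
--                 known.add(prefix)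
--                 yield prefix
-- ===== Notes on version B (the rewrite author's own statement) =====
-- stated objective: simpler
-- what changed: Replaces A's recursive inner generator over get_namespace_parent with a single iterative pass: each namespace's ancestor chain is built directly as the list of its prefixes cut at each '.' and each prefix is yielded once through the shared known set.
import Mathlib
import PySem

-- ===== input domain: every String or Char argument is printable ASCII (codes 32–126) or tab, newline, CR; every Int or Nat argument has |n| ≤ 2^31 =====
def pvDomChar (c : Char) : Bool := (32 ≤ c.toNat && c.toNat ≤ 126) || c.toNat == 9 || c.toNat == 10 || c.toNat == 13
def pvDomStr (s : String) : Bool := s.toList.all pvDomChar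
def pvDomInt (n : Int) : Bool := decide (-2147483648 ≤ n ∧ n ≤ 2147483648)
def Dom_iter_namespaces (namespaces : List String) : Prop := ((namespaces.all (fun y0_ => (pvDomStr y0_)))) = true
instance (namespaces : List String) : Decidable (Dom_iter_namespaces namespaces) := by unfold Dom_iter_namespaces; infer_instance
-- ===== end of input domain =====

-- B replaces A's recursive generator (parent-first recursion over get_namespace_parent) by one
-- iterative pass that builds each namespace's ancestor chain as its prefixes cut at each '.' (simpler).

-- ===== PORT A =====
-- s.rsplit('.', 1)[0]: everything before the LAST '.'; exact whenever '.' ∈ cs (the only way A uses it)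
def pvBeforeLastDot (cs : List Char) : List Char :=
  match cs with
  | [] => []
  | c :: rest =>
      if '.' ∈ rest then c :: pvBeforeLastDot rest
      else if c = '.' then [] else c :: pvBeforeLastDot rest

-- needed by pvSubA's termination proof, hence stated above it (cited in decreasing_by)
theorem pvBeforeLastDot_length {cs : List Char} (h : '.' ∈ cs) :
    (pvBeforeLastDot cs).length < cs.length := by
  induction cs with
  | nil => cases h
  | cons c rest ih =>
      by_cases hr : '.' ∈ rest
      · simp only [pvBeforeLastDot, if_pos hr, List.length_cons]
        exact Nat.succ_lt_succ (ih hr)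
      · have hc : c = '.' := by
          rcases List.mem_cons.mp h with h1 | h2
          · exact h1.symm
          · exact absurd h2 hr
        simp [pvBeforeLastDot, hr, hc]

-- get_namespace_parent: '.' in s tested as single-character list membership (exact for a 1-char needle)
def pvParentA (cs : List Char) : Option (List Char) :=
  if '.' ∈ cs then some (pvBeforeLastDot cs) else none

-- the inner generator 'subroutine': returns (yielded list, updated known)
def pvSubA (known : PySem.Set (List Char)) (cs : List Char) :
    List (List Char) × PySem.Set (List Char) :=
  if cs ∈ known then ([], known)
  else
    -- 'if parent_namespace:' — truthy iff the parent is Some nonempty string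
    let r :=
      if h : (pvParentA cs).getD [] ≠ [] then pvSubA known ((pvParentA cs).getD [])
      else ([], known)
    (r.1 ++ [cs], PySem.Set.add r.2 cs)
termination_by cs.length
decreasing_by
  by_cases hd : '.' ∈ cs
  · simpa [pvParentA, hd] using pvBeforeLastDot_length hd
  · simp [pvParentA, hd] at h

def iter_namespaces (namespaces : List String) : List String :=
  ((namespaces.foldl (fun acc ns =>
      let r := pvSubA acc.2 ns.toList
      (acc.1 ++ r.1, r.2))
    (([] : List (List Char)), (PySem.Set.empty : PySem.Set (List Char)))).1).map String.ofList

-- ===== PORT B =====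
-- [ns[:i] for i, ch in enumerate(ns) if ch == '.']
def pvDots (cs : List Char) : List (List Char) :=
  ((PySem.List.enumerate cs).filter (fun p => p.2 == '.')).map
    (fun p => PySem.List.slice cs none (some p.1))

-- chain = dots + [ns]; drop a leading empty prefix (Source B's 'del chain[0]' guard)
def pvChainCut (cs : List Char) : List (List Char) :=
  let chain0 := pvDots cs ++ [cs]
  if 1 < chain0.length ∧ chain0.headD [] = [] then chain0.tail else chain0

-- body of Source B's inner loop: 'if prefix not in known: known.add(prefix); yield prefix'
def pvStep (acc : List (List Char) × PySem.Set (List Char)) (p : List Char) :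
    List (List Char) × PySem.Set (List Char) :=
  if p ∈ acc.2 then acc else (acc.1 ++ [p], PySem.Set.add acc.2 p)

def iter_namespaces_alt (namespaces : List String) : List String :=
  ((namespaces.foldl (fun acc ns => (pvChainCut ns.toList).foldl pvStep acc)
    (([] : List (List Char)), (PySem.Set.empty : PySem.Set (List Char)))).1).map String.ofList

-- ===== PRECONDITION & SPEC =====
def Spec_iter_namespaces (namespaces : List String) (out : List String) : Prop := out = iter_namespaces_alt namespaces
instance (namespaces : List String) (out : List String) : Decidable (Spec_iter_namespaces namespaces out) := by unfold Spec_iter_namespaces; infer_instance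

-- ===== CLAIM (what is proved, stated in full; the proofs are below) =====
def Claim_equal_iter_namespaces : Prop := ∀ (namespaces : List String), Dom_iter_namespaces namespaces → Spec_iter_namespaces namespaces (iter_namespaces namespaces)

-- ===== LEMMAS AND PROOFS =====

-- the dite condition of pvSubA in closed form
theorem pv_cond_iff (cs : List Char) :
    (pvParentA cs).getD [] ≠ [] ↔ '.' ∈ cs ∧ pvBeforeLastDot cs ≠ [] := by
  by_cases hd : '.' ∈ cs <;> simp [pvParentA, hd]

-- known is ancestor-closed (A yields a parent before its child, so this invariant holds throughout)
def pvInv (known : PySem.Set (List Char)) : Prop :=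
  ∀ x ∈ known, '.' ∈ x → pvBeforeLastDot x ≠ [] → pvBeforeLastDot x ∈ known

theorem pv_enum_shift (xs : List Char) (s : Int) :
    PySem.List.enumerate xs (s + 1) = (PySem.List.enumerate xs s).map (fun p => (p.1 + 1, p.2)) := by
  induction xs generalizing s with
  | nil => simp [PySem.List.enumerate_nil]
  | cons c cs ih => simp [PySem.List.enumerate_cons, ih (s + 1)]

theorem pvDots_cons (c : Char) (cs : List Char) :
    pvDots (c :: cs) = (if c = '.' then [([] : List Char)] else []) ++ (pvDots cs).map (c :: ·) := by
  have hmap : List.map (fun p => PySem.List.slice (c :: cs) none (some p.1))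
      (List.map (fun p => ((p.1 : Int) + 1, p.2)) ((PySem.List.enumerate cs).filter (fun p => p.2 == '.')))
      = ((pvDots cs).map (c :: ·)) := by
    unfold pvDots
    rw [List.map_map, List.map_map]
    apply List.map_congr_left
    intro p hp
    have hm := List.mem_of_mem_filter hp
    rcases (PySem.List.mem_enumerate_iff _ _ _).mp hm with ⟨k, hk, rfl⟩
    simp only [Function.comp]
    rw [PySem.List.slice_to _ (by positivity), PySem.List.slice_to _ (by positivity)]
    have h1 : ((0:Int) + ↑k + 1).toNat = k + 1 := by omega
    have h2 : ((0:Int) + ↑k).toNat = k := by omega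
    rw [h1, h2, List.take_succ_cons]
  unfold pvDots
  rw [PySem.List.enumerate_cons, pv_enum_shift, List.filter_cons, List.filter_map]
  simp only [Function.comp_def]
  by_cases hc : c = '.'
  · have hb : (((0:Int), c).2 == '.') = true := by simp [hc]
    rw [hb]
    simp only [if_true, List.map_cons, hmap, if_pos hc]
    rw [PySem.List.slice_to _ (le_refl (0:Int))]
    simp [pvDots, List.map_map, Function.comp_def]
  · have hb : (((0:Int), c).2 == '.') = false := by simp [hc]
    rw [hb]
    simp only [Bool.false_eq_true, if_false, hmap, if_neg hc]
    simp [pvDots, List.map_map, Function.comp_def]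

theorem pvDots_not_dot {cs : List Char} (h : '.' ∉ cs) : pvDots cs = [] := by
  induction cs with
  | nil => rfl
  | cons c rest ih =>
      have hc : ¬ c = '.' := fun hc => h (hc ▸ List.mem_cons_self)
      rw [pvDots_cons, ih (fun hr => h (List.mem_cons_of_mem _ hr))]
      simp [hc]

theorem pvDots_dot {cs : List Char} (h : '.' ∈ cs) :
    pvDots cs = if pvBeforeLastDot cs = [] then [([] : List Char)]
                else pvDots (pvBeforeLastDot cs) ++ [pvBeforeLastDot cs] := by
  induction cs with
  | nil => cases h
  | cons c rest ih =>
      by_cases hr : '.' ∈ rest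
      · have hB : pvBeforeLastDot (c :: rest) = c :: pvBeforeLastDot rest := by
          simp [pvBeforeLastDot, hr]
        rw [pvDots_cons, hB, ih hr]
        by_cases hbn : pvBeforeLastDot rest = []
        · simp [hbn, pvDots_cons, show pvDots [] = [] from rfl]
        · simp only [if_neg hbn, if_neg (List.cons_ne_nil c _)]
          rw [pvDots_cons]
          simp [List.map_append]
      · have hc : c = '.' := by
          rcases List.mem_cons.mp h with h1 | h2
          · exact h1.symm
          · exact absurd h2 hr
        have hB : pvBeforeLastDot (c :: rest) = [] := by simp [pvBeforeLastDot, hr, hc]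
        rw [pvDots_cons, hB, pvDots_not_dot hr]
        simp [hc]

theorem pvChainCut_not_dot {cs : List Char} (h : '.' ∉ cs) : pvChainCut cs = [cs] := by
  unfold pvChainCut
  rw [pvDots_not_dot h]
  simp

theorem pvChainCut_dot_nil {cs : List Char} (h : '.' ∈ cs) (hp : pvBeforeLastDot cs = []) :
    pvChainCut cs = [cs] := by
  unfold pvChainCut
  rw [pvDots_dot h, if_pos hp]
  simp

theorem pvChainCut_dot {cs : List Char} (h : '.' ∈ cs) (hp : pvBeforeLastDot cs ≠ []) :
    pvChainCut cs = pvChainCut (pvBeforeLastDot cs) ++ [cs] := by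
  unfold pvChainCut
  rw [pvDots_dot h, if_neg hp]
  cases hd : pvDots (pvBeforeLastDot cs) with
  | nil =>
      simp [hp]
  | cons x t =>
      by_cases hx : x = []
      · subst hx
        simp
      · simp [hx]

theorem pv_mem_dots_length {cs x : List Char} (hx : x ∈ pvDots cs) : x.length ≤ cs.length := by
  induction cs generalizing x with
  | nil => simp [show pvDots [] = ([] : List (List Char)) from rfl] at hx
  | cons c rest ih =>
      rw [pvDots_cons] at hx
      rcases List.mem_append.mp hx with h1 | h2
      · have : x = [] := by
          by_cases hc : c = '.' <;> simp [hc] at h1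
          · exact h1
        simp [this]
      · rcases List.mem_map.mp h2 with ⟨y, hy, rfl⟩
        simpa using Nat.succ_le_succ (ih hy)

theorem pv_mem_chainCut_length {cs x : List Char} (hx : x ∈ pvChainCut cs) : x.length ≤ cs.length := by
  have hx0 : x ∈ pvDots cs ++ [cs] := by
    unfold pvChainCut at hx
    by_cases hc : 1 < (pvDots cs ++ [cs]).length ∧ (pvDots cs ++ [cs]).headD [] = []
    · rw [if_pos hc] at hx
      exact List.mem_of_mem_tail hx
    · rwa [if_neg hc] at hx
  rcases List.mem_append.mp hx0 with h1 | h2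
  · exact pv_mem_dots_length h1
  · simp at h2; simp [h2]

theorem pvStepFold_mem (l : List (List Char)) (acc : List (List Char) × PySem.Set (List Char))
    (y : List Char) : y ∈ (l.foldl pvStep acc).2 ↔ y ∈ acc.2 ∨ y ∈ l := by
  induction l generalizing acc with
  | nil => simp
  | cons x t ih =>
      rw [List.foldl_cons, ih]
      unfold pvStep
      by_cases hx : x ∈ acc.2
      · rw [if_pos hx]
        constructor
        · rintro (h | h)
          · exact Or.inl h
          · exact Or.inr (List.mem_cons_of_mem _ h)
        · rintro (h | h)
          · exact Or.inl h
          · rcases List.mem_cons.mp h with rfl | h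
            · exact Or.inl hx
            · exact Or.inr h
      · rw [if_neg hx]
        simp only [PySem.Set.mem_add, List.mem_cons]
        tauto

theorem pvStepFold_known {l : List (List Char)} {acc : List (List Char) × PySem.Set (List Char)}
    (h : ∀ x ∈ l, x ∈ acc.2) : l.foldl pvStep acc = acc := by
  induction l with
  | nil => rfl
  | cons x t ih =>
      rw [List.foldl_cons]
      unfold pvStep
      rw [if_pos (h x List.mem_cons_self)]
      exact ih (fun x hx => h x (List.mem_cons_of_mem _ hx))

theorem pvSubA_self_mem (known : PySem.Set (List Char)) (cs : List Char) :
    cs ∈ (pvSubA known cs).2 := by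
  rw [pvSubA]
  by_cases hk : cs ∈ known
  · simpa [hk]
  · simp only [if_neg hk]
    exact (PySem.Set.mem_add _ _ _).mpr (Or.inr rfl)

theorem pvSubA_inv : ∀ (n : Nat) (cs : List Char), cs.length = n →
    ∀ (known : PySem.Set (List Char)), pvInv known → pvInv (pvSubA known cs).2 := by
  intro n
  induction n using Nat.strong_induction_on with
  | _ n ih =>
      intro cs hlen known hInv
      rw [pvSubA]
      by_cases hk : cs ∈ known
      · simpa [hk] using hInv
      · simp only [if_neg hk]
        by_cases hc : (pvParentA cs).getD [] ≠ []
        · rw [dif_pos hc]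
          rcases (pv_cond_iff cs).mp hc with ⟨hd, hbn⟩
          have hpar : (pvParentA cs).getD [] = pvBeforeLastDot cs := by simp [pvParentA, hd]
          have hlt : (pvBeforeLastDot cs).length < cs.length := pvBeforeLastDot_length hd
          have hInv' : pvInv (pvSubA known (pvBeforeLastDot cs)).2 := by
            rw [← hpar] at hlt ⊢
            exact ih _ (hlen ▸ hlt) _ rfl known hInv
          intro x hx hxd hxb
          rw [hpar] at hx ⊢
          rcases (PySem.Set.mem_add _ _ _).mp hx with hmem | rfl
          · exact (PySem.Set.mem_add _ _ _).mpr (Or.inl (hInv' x hmem hxd hxb))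
          · exact (PySem.Set.mem_add _ _ _).mpr (Or.inl (pvSubA_self_mem _ _))
        · rw [dif_neg hc]
          intro x hx hxd hxb
          rcases (PySem.Set.mem_add _ _ _).mp hx with hmem | rfl
          · exact (PySem.Set.mem_add _ _ _).mpr (Or.inl (hInv x hmem hxd hxb))
          · exact absurd ((pv_cond_iff x).mpr ⟨hxd, hxb⟩) hc

theorem pv_chain_closed : ∀ (n : Nat) (cs : List Char), cs.length = n →
    ∀ (known : PySem.Set (List Char)), pvInv known → cs ∈ known →
    ∀ x ∈ pvChainCut cs, x ∈ known := by
  intro n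
  induction n using Nat.strong_induction_on with
  | _ n ih =>
      intro cs hlen known hInv hcs x hx
      by_cases hd : '.' ∈ cs
      · by_cases hbn : pvBeforeLastDot cs = []
        · rw [pvChainCut_dot_nil hd hbn] at hx
          simp at hx; rwa [hx]
        · rw [pvChainCut_dot hd hbn] at hx
          rcases List.mem_append.mp hx with h1 | h2
          · have hpk : pvBeforeLastDot cs ∈ known := hInv cs hcs hd hbn
            exact ih _ (hlen ▸ pvBeforeLastDot_length hd) _ rfl known hInv hpk x h1
          · simp at h2; rwa [h2]
      · rw [pvChainCut_not_dot hd] at hx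
        simp at hx; rwa [hx]

theorem pv_main : ∀ (n : Nat) (cs : List Char), cs.length = n →
    ∀ (known : PySem.Set (List Char)) (out : List (List Char)), pvInv known →
    (pvChainCut cs).foldl pvStep (out, known)
      = (out ++ (pvSubA known cs).1, (pvSubA known cs).2) := by
  intro n
  induction n using Nat.strong_induction_on with
  | _ n ih =>
      intro cs hlen known out hInv
      rw [pvSubA]
      by_cases hk : cs ∈ known
      · rw [if_pos hk]
        rw [pvStepFold_known (fun x hx => pv_chain_closed _ cs hlen known hInv hk x hx)]
        simp
      · rw [if_neg hk]
        by_cases hc : (pvParentA cs).getD [] ≠ []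
        · rcases (pv_cond_iff cs).mp hc with ⟨hd, hbn⟩
          have hpar : (pvParentA cs).getD [] = pvBeforeLastDot cs := by simp [pvParentA, hd]
          have hlt : (pvBeforeLastDot cs).length < cs.length := pvBeforeLastDot_length hd
          simp only [hpar]
          rw [pvChainCut_dot hd hbn, List.foldl_append,
            ih _ (hlen ▸ hlt) _ rfl known out hInv]
          have hnotin : cs ∉ (pvSubA known (pvBeforeLastDot cs)).2 := by
            intro hmem
            have := (pvStepFold_mem (pvChainCut (pvBeforeLastDot cs)) (out, known) cs).mp
              (by rw [ih _ (hlen ▸ hlt) _ rfl known out hInv]; exact hmem)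
            rcases this with h1 | h2
            · exact hk h1
            · have := pv_mem_chainCut_length h2
              omega
          simp only [List.foldl_cons, List.foldl_nil]
          unfold pvStep
          rw [if_neg hnotin]
          simp [hbn]
        · simp only [dif_neg hc]
          have hchain : pvChainCut cs = [cs] := by
            by_cases hd : '.' ∈ cs
            · have hbn : pvBeforeLastDot cs = [] := by
                by_contra hbn
                exact hc ((pv_cond_iff cs).mpr ⟨hd, hbn⟩)
              exact pvChainCut_dot_nil hd hbn
            · exact pvChainCut_not_dot hd
          rw [hchain]
          simp only [List.foldl_cons, List.foldl_nil]
          unfold pvStep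
          rw [if_neg hk]
          simp

theorem pv_outer (nss : List String) :
    ∀ (out : List (List Char)) (known : PySem.Set (List Char)), pvInv known →
    nss.foldl (fun acc ns =>
        let r := pvSubA acc.2 ns.toList
        (acc.1 ++ r.1, r.2)) (out, known)
      = nss.foldl (fun acc ns => (pvChainCut ns.toList).foldl pvStep acc) (out, known) := by
  induction nss with
  | nil => intro out known _; rfl
  | cons ns t ih =>
      intro out known hInv
      simp only [List.foldl_cons]
      rw [pv_main _ ns.toList rfl known out hInv]
      exact ih _ _ (pvSubA_inv _ ns.toList rfl known hInv)

-- ===== VERDICT (by name: the statement is the Claim_ definition above) =====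
theorem iter_namespaces_spec : Claim_equal_iter_namespaces := by
  intro namespaces _
  unfold Spec_iter_namespaces iter_namespaces iter_namespaces_alt
  rw [pv_outer namespaces [] PySem.Set.empty (by intro x hx; cases hx)]
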